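-- pv_equiv track=rewrite | github.com/VickyA5/TP-Programacion-Dinamica | problema_bottom_up.py | valor_max_sophia
-- ===== SOURCE A (Python) =====
-- def valor_max_sophia(coins):
--     n = len(coins)
--     # Crear una tabla DP para almacenar las soluciones a subproblemas
--     dp = [[0] * n for _ in range(n)]
--
--     # Llenar la tabla DP de abajo hacia arriba
--     for length in range(1, n + 1):  # length es el tama침o de la subsecuencia
--         for i in range(n - length + 1):
--             j = i + length - 1
--             if i == j:
--                 dp[i][j] = coins[i]  # Caso base: una moneda
--             elif i + 1 == j:
--                 dp[i][j] = max(coins[i], coins[j])  # Caso base: dos monedas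
--             else:
--                 # La recurrencia basada en las elecciones de Sophia y Mateo
--                 a = coins[i] + dp[i + 2][j] if coins[i + 1] >= coins[j] else 0
--                 b = coins[i] + dp[i + 1][j - 1] if coins[i + 1] < coins[j] else 0
--                 c = coins[j] + dp[i + 1][j - 1] if coins[i] >= coins[j - 1] else 0
--                 d = coins[j] + dp[i][j - 2] if coins[i] < coins[j - 1] else 0
--                 dp[i][j] = max(a, b, c, d)
--
--     # El resultado est치 en dp[0][n-1]
--     return dp
-- ===== SOURCE B (Python) =====
-- def valor_max_sophia(coins):
--     n = len(coins)
--     dp = [[0] * n for _ in range(n)]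
--     memo = {}
--
--     def solve(i, j):
--         if (i, j) in memo:
--             return memo[(i, j)]
--         if i == j:
--             v = coins[i]
--         elif i + 1 == j:
--             v = max(coins[i], coins[j])
--         else:
--             a = coins[i] + solve(i + 2, j) if coins[i + 1] >= coins[j] else 0
--             b = coins[i] + solve(i + 1, j - 1) if coins[i + 1] < coins[j] else 0
--             c = coins[j] + solve(i + 1, j - 1) if coins[i] >= coins[j - 1] else 0
--             d = coins[j] + solve(i, j - 2) if coins[i] < coins[j - 1] else 0
--             v = max(a, b, c, d)
--         memo[(i, j)] = v
--         return v
--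
--     # fill the upper triangle; i descending keeps the memoized recursion shallow
--     for i in range(n - 1, -1, -1):
--         for j in range(i, n):
--             dp[i][j] = solve(i, j)
--     return dp
-- ===== Notes on version B (the rewrite author's own statement) =====
-- stated objective: alternative
-- what changed: Replaces the bottom-up length/start-index tabulation loops with a memoized recursive solve(i, j) on the same recurrence, driven over the upper triangle to fill the returned table.
import Mathlib
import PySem

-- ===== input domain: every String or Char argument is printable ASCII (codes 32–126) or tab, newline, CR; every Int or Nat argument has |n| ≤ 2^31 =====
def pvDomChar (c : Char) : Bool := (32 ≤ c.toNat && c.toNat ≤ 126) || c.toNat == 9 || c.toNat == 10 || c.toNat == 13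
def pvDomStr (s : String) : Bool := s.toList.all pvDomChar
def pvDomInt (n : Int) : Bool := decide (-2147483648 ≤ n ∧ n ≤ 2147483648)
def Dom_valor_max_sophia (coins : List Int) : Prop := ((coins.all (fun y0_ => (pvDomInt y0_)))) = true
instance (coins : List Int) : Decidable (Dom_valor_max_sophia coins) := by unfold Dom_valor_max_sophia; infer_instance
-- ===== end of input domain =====

-- B replaces A's bottom-up length/i tabulation loops by a top-down recursion on (i, j)
-- (memoized in the Python; the pure Lean port computes the same values) — objective: alternative decomposition.


-- ===== PORT A =====
-- coins[i] for a Nat index that A only ever uses in range: getD is exact there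
def pvCoin (coins : List Int) (i : Nat) : Int := coins.getD i 0

-- dp[i][j] read / dp[i][j] = v write on the list-of-lists table
def pvRead (dp : List (List Int)) (i j : Nat) : Int := (dp.getD i []).getD j 0
def pvWrite (dp : List (List Int)) (i j : Nat) (v : Int) : List (List Int) :=
  dp.set i ((dp.getD i []).set j v)

-- body of A's inner loop (one cell (i, i+length-1))
def pvStepA (coins : List Int) (length : Nat) (dp : List (List Int)) (i : Nat) : List (List Int) :=
  let j := i + length - 1
  if i = j then pvWrite dp i j (pvCoin coins i)
  else if i + 1 = j then pvWrite dp i j (max (pvCoin coins i) (pvCoin coins j))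
  else
    let a := if pvCoin coins (i+1) ≥ pvCoin coins j then pvCoin coins i + pvRead dp (i+2) j else 0
    let b := if pvCoin coins (i+1) < pvCoin coins j then pvCoin coins i + pvRead dp (i+1) (j-1) else 0
    let c := if pvCoin coins i ≥ pvCoin coins (j-1) then pvCoin coins j + pvRead dp (i+1) (j-1) else 0
    let d := if pvCoin coins i < pvCoin coins (j-1) then pvCoin coins j + pvRead dp i (j-2) else 0
    pvWrite dp i j (max (max (max a b) c) d)

def valor_max_sophia (coins : List Int) : List (List Int) :=
  let n := coins.length
  (List.range' 1 n).foldl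
    (fun dp length => (List.range (n - length + 1)).foldl (pvStepA coins length) dp)
    (List.replicate n (List.replicate n 0))

-- ===== PORT B =====
-- B's recursive solve(i, j) (the Python memo cache only avoids recomputation; dropped here)
def pvSolve (coins : List Int) (i j : Nat) : Int :=
  if _h1 : i = j then pvCoin coins i
  else if _h2 : i + 1 = j then max (pvCoin coins i) (pvCoin coins j)
  else if _h3 : i < j then
    let a := if pvCoin coins (i+1) ≥ pvCoin coins j then pvCoin coins i + pvSolve coins (i+2) j else 0
    let b := if pvCoin coins (i+1) < pvCoin coins j then pvCoin coins i + pvSolve coins (i+1) (j-1) else 0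
    let c := if pvCoin coins i ≥ pvCoin coins (j-1) then pvCoin coins j + pvSolve coins (i+1) (j-1) else 0
    let d := if pvCoin coins i < pvCoin coins (j-1) then pvCoin coins j + pvSolve coins i (j-2) else 0
    max (max (max a b) c) d
  else 0
termination_by j - i
decreasing_by all_goals omega

-- B: preallocated zero table with every upper-triangular cell set to solve(i, j)
def valor_max_sophia_alt (coins : List Int) : List (List Int) :=
  let n := coins.length
  (List.range n).map (fun i => (List.range n).map (fun j =>
    if i ≤ j then pvSolve coins i j else 0))

-- ===== PRECONDITION & SPEC =====
def Spec_valor_max_sophia (coins : List Int) (out : List (List Int)) : Prop := out = valor_max_sophia_alt coins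
instance (coins : List Int) (out : List (List Int)) : Decidable (Spec_valor_max_sophia coins out) := by unfold Spec_valor_max_sophia; infer_instance

-- ===== CLAIM (what is proved, stated in full; the proofs are below) =====
def Claim_equal_valor_max_sophia : Prop := ∀ (coins : List Int), Dom_valor_max_sophia coins → Spec_valor_max_sophia coins (valor_max_sophia coins)

-- ===== LEMMAS AND PROOFS =====
-- table shape: n rows of length n
def pvShaped (n : Nat) (dp : List (List Int)) : Prop :=
  dp.length = n ∧ ∀ r ∈ dp, r.length = n

-- loop invariant: after the outer lengths below `length` are done and the first `k` cells of
-- the current diagonal are written, every cell holds its pvSolve value (filled) or 0 (not yet)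
def pvInv (coins : List Int) (length k : Nat) (dp : List (List Int)) : Prop :=
  pvShaped coins.length dp ∧
  ∀ i j : Nat, i < coins.length → j < coins.length →
    pvRead dp i j =
      if i ≤ j ∧ (j + 2 ≤ i + length ∨ (j + 1 = i + length ∧ i < k)) then pvSolve coins i j else 0

theorem pvSolve_base (coins : List Int) (i j : Nat) (h : i = j) :
    pvSolve coins i j = pvCoin coins i := by
  rw [pvSolve, dif_pos h]

theorem pvSolve_two (coins : List Int) (i j : Nat) (h : i + 1 = j) (hne : i ≠ j) :
    pvSolve coins i j = max (pvCoin coins i) (pvCoin coins j) := by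
  rw [pvSolve, dif_neg hne, dif_pos h]

theorem pvSolve_rec (coins : List Int) (i j : Nat) (h : i + 2 ≤ j) :
    pvSolve coins i j =
      max (max (max
        (if pvCoin coins (i+1) ≥ pvCoin coins j then pvCoin coins i + pvSolve coins (i+2) j else 0)
        (if pvCoin coins (i+1) < pvCoin coins j then pvCoin coins i + pvSolve coins (i+1) (j-1) else 0))
        (if pvCoin coins i ≥ pvCoin coins (j-1) then pvCoin coins j + pvSolve coins (i+1) (j-1) else 0))
        (if pvCoin coins i < pvCoin coins (j-1) then pvCoin coins j + pvSolve coins i (j-2) else 0) := by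
  rw [pvSolve, dif_neg (by omega), dif_neg (by omega), dif_pos (by omega)]

theorem pvShaped_write (n : Nat) (dp : List (List Int)) (i j : Nat) (v : Int)
    (h : pvShaped n dp) (hi : i < n) : pvShaped n (pvWrite dp i j v) := by
  obtain ⟨hlen, hrows⟩ := h
  refine ⟨by simp [pvWrite, hlen], fun r hr => ?_⟩
  rcases List.mem_or_eq_of_mem_set hr with hr' | hr'
  · exact hrows r hr'
  · subst hr'
    rw [List.length_set, List.getD_eq_getElem dp [] (by omega)]
    exact hrows _ (List.getElem_mem (by omega))

theorem pvRead_write (n : Nat) (dp : List (List Int)) (i j i' j' : Nat) (v : Int)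
    (h : pvShaped n dp) (hi : i < n) (hi' : i' < n) (hj' : j' < n) :
    pvRead (pvWrite dp i j v) i' j' = if i = i' ∧ j = j' then v else pvRead dp i' j' := by
  obtain ⟨hlen, hrows⟩ := h
  have hilen : i < dp.length := by omega
  have hrowi : (dp.getD i []).length = n := by
    rw [List.getD_eq_getElem dp [] hilen]; exact hrows _ (List.getElem_mem hilen)
  have hsetlen : ((dp.getD i []).set j v).length = n := by rw [List.length_set]; exact hrowi
  by_cases hii : i = i'
  · subst hii
    have hrw : pvRead (pvWrite dp i j v) i j' = ((dp.getD i []).set j v).getD j' 0 := by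
      unfold pvRead pvWrite
      rw [List.getD_eq_getElem (dp.set i _) [] (by simpa [hlen] using hi)]
      rw [List.getElem_set, if_pos rfl]
    rw [hrw]
    by_cases hjj : j = j'
    · subst hjj
      rw [List.getD_eq_getElem _ 0 (by omega), List.getElem_set, if_pos rfl, if_pos ⟨rfl, rfl⟩]
    · rw [if_neg (by tauto)]
      unfold pvRead
      rw [List.getD_eq_getElem _ 0 (by omega), List.getElem_set, if_neg hjj,
        List.getD_eq_getElem _ 0 (by omega)]
  · rw [if_neg (by tauto)]
    unfold pvRead pvWrite
    have hrw : (dp.set i ((dp.getD i []).set j v)).getD i' [] = dp.getD i' [] := by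
      rw [List.getD_eq_getElem _ [] (by simpa [hlen] using hi'),
        List.getElem_set, if_neg hii]
      exact (List.getD_eq_getElem dp [] (by omega)).symm
    rw [hrw]

theorem pvInv_step (coins : List Int) (length k : Nat) (dp : List (List Int))
    (hlen1 : 1 ≤ length) (hk : k + length ≤ coins.length) (h : pvInv coins length k dp) :
    pvInv coins length (k + 1) (pvStepA coins length dp k) := by
  obtain ⟨hsh, hread⟩ := h
  have hkn : k < coins.length := by omega
  have hj0 : k + length - 1 < coins.length := by omega
  have hafter : pvStepA coins length dp k =
      pvWrite dp k (k + length - 1) (pvSolve coins k (k + length - 1)) := by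
    simp only [pvStepA]
    by_cases h1 : k = k + length - 1
    · rw [if_pos h1, pvSolve_base coins k (k + length - 1) h1]
    · rw [if_neg h1]
      by_cases h2 : k + 1 = k + length - 1
      · rw [if_pos h2, pvSolve_two coins k (k + length - 1) h2 h1]
      · rw [if_neg h2]
        have e1 : pvRead dp (k+2) (k+length-1) = pvSolve coins (k+2) (k+length-1) := by
          rw [hread _ _ (by omega) hj0]; exact if_pos (by omega)
        have e2 : pvRead dp (k+1) (k+length-1-1) = pvSolve coins (k+1) (k+length-1-1) := by
          rw [hread _ _ (by omega) (by omega)]; exact if_pos (by omega)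
        have e3 : pvRead dp k (k+length-1-2) = pvSolve coins k (k+length-1-2) := by
          rw [hread _ _ hkn (by omega)]; exact if_pos (by omega)
        rw [e1, e2, e3, pvSolve_rec coins k (k + length - 1) (by omega)]
  rw [hafter]
  refine ⟨pvShaped_write _ _ _ _ _ hsh hkn, fun i j hi hj => ?_⟩
  rw [pvRead_write coins.length dp k (k+length-1) i j _ hsh hkn hi hj]
  by_cases hc : k = i ∧ k + length - 1 = j
  · obtain ⟨hck, hcj⟩ := hc
    subst hck; subst hcj
    rw [if_pos ⟨rfl, rfl⟩, if_pos (by omega)]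
  · rw [if_neg hc, hread i j hi hj]
    by_cases hc1 : i ≤ j ∧ (j + 2 ≤ i + length ∨ (j + 1 = i + length ∧ i < k))
    · rw [if_pos hc1, if_pos (by omega)]
    · rw [if_neg hc1, if_neg (by omega)]

theorem pvInv_loop (coins : List Int) (length : Nat) (dp : List (List Int))
    (hlen1 : 1 ≤ length) (hln : length ≤ coins.length) (h : pvInv coins length 0 dp)
    (m : Nat) (hm : m ≤ coins.length - length + 1) :
    pvInv coins length m ((List.range m).foldl (pvStepA coins length) dp) := by
  induction m with
  | zero => simpa using h
  | succ m ih =>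
    rw [List.range_succ, List.foldl_append, List.foldl_cons, List.foldl_nil]
    exact pvInv_step coins length m _ hlen1 (by omega) (ih (by omega))

theorem pvInv_next (coins : List Int) (length : Nat) (dp : List (List Int))
    (hln : length ≤ coins.length)
    (h : pvInv coins length (coins.length - length + 1) dp) :
    pvInv coins (length + 1) 0 dp := by
  refine ⟨h.1, fun i j hi hj => ?_⟩
  rw [h.2 i j hi hj]
  have hiff : (i ≤ j ∧ (j + 2 ≤ i + length ∨ (j + 1 = i + length ∧ i < coins.length - length + 1))) ↔
      (i ≤ j ∧ (j + 2 ≤ i + (length + 1) ∨ (j + 1 = i + (length + 1) ∧ i < 0))) := by omega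
  simp only [hiff]

theorem pvOuter (coins : List Int) (L : Nat) (hL : L ≤ coins.length) :
    pvInv coins (L + 1) 0
      ((List.range' 1 L).foldl
        (fun dp length => (List.range (coins.length - length + 1)).foldl (pvStepA coins length) dp)
        (List.replicate coins.length (List.replicate coins.length 0))) := by
  induction L with
  | zero =>
    rw [List.range'_zero, List.foldl_nil]
    refine ⟨⟨List.length_replicate, fun r hr => by
        rw [List.eq_of_mem_replicate hr]; exact List.length_replicate⟩,
      fun i j hi hj => ?_⟩
    have hz : pvRead (List.replicate coins.length (List.replicate coins.length 0)) i j = 0 := by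
      unfold pvRead
      rw [List.getD_replicate _ hi, List.getD_replicate _ hj]
    rw [hz, if_neg (by omega)]
  | succ L ih =>
    rw [List.range'_1_concat, Nat.add_comm 1 L, List.foldl_append, List.foldl_cons, List.foldl_nil]
    exact pvInv_next coins (L + 1) _ (by omega)
      (pvInv_loop coins (L + 1) _ (by omega) (by omega) (ih (by omega))
        (coins.length - (L + 1) + 1) le_rfl)

-- ===== VERDICT (by name: the statement is the Claim_ definition above) =====
theorem valor_max_sophia_spec : Claim_equal_valor_max_sophia := by
  intro coins _
  unfold Spec_valor_max_sophia
  obtain ⟨⟨hlen, hrows⟩, hread⟩ := pvOuter coins coins.length le_rfl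
  show valor_max_sophia coins = valor_max_sophia_alt coins
  unfold valor_max_sophia valor_max_sophia_alt
  apply List.ext_getElem (by simpa using hlen)
  intro i h1 h2
  rw [List.getElem_map, List.getElem_range]
  have hi : i < coins.length := by rw [← hlen]; exact h1
  have hrowlen := hrows _ (List.getElem_mem h1)
  apply List.ext_getElem (by simpa using hrowlen)
  intro j hj1 hj2
  rw [List.getElem_map, List.getElem_range]
  have hj : j < coins.length := lt_of_lt_of_eq hj1 hrowlen
  have hr := hread i j hi hj
  unfold pvRead at hr
  rw [List.getD_eq_getElem _ [] h1, List.getD_eq_getElem _ 0 hj1] at hr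
  rw [hr]
  have hiff : (i ≤ j ∧ (j + 2 ≤ i + (coins.length + 1) ∨
      (j + 1 = i + (coins.length + 1) ∧ i < 0))) ↔ i ≤ j := by omega
  simp only [hiff]
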